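-- pv_equiv track=rewrite | github.com/Ikerlb/kattis | rot/sol.py | format_45
-- ===== SOURCE A (Python) =====
-- def get_diagonals(grid, k):
--     n, m = len(grid), len(grid[0])
--     for i in reversed(range(n)):
--         if 0 <= k - i < m:
--             yield i, k - i
--
-- def format_45(grid):
--     n, m = len(grid), len(grid[0])
--     res = []
--     for i in range(n):
--         row = []
--         row.append(" " * (n - i - 1))
--         row.append(" ".join(grid[r][c] for r, c in get_diagonals(grid, i)))
--         res.append("".join(row))
--     for i in range(m - 1):
--         row = []
--         row.append(" " * (i + 1))
--         row.append(" ".join(grid[r][c] for r,c in get_diagonals(grid,n+i)))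
--         res.append("".join(row))
--     return "\n".join(res)
-- ===== SOURCE B (Python) =====
-- def format_45(grid):
--     n, m = len(grid), len(grid[0])
--     diags = [[] for _ in range(n + m - 1)]
--     for r in reversed(range(n)):
--         row = grid[r]
--         for c in range(m):
--             diags[r + c].append(row[c])
--     return "\n".join(" " * abs(n - 1 - k) + " ".join(d) for k, d in enumerate(diags))
-- ===== Notes on version B (the rewrite author's own statement) =====
-- stated objective: alternative
-- what changed: B makes one pass over the grid cells, scattering each cell into a bucket indexed by its diagonal r+c (rows visited in reverse so each bucket is already in A's order), then renders the buckets; A instead gathers each output line by filtering all n row indices per diagonal through a generator.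
-- outside the precondition, e.g. on format_45([[], []]): A returns ' \n', B returns ' '
import Mathlib
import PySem

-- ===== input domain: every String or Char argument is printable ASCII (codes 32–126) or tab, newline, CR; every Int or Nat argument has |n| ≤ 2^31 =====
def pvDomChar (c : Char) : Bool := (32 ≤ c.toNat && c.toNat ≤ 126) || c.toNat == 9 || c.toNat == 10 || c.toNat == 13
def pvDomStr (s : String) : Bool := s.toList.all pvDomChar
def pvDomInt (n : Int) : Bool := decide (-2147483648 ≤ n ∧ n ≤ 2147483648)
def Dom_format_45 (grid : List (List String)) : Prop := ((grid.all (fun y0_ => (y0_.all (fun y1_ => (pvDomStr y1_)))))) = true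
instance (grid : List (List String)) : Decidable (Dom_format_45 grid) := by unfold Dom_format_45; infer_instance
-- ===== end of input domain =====

-- B replaces A's per-line scan over all rows by a single pass over the grid cells that
-- scatters each cell into the bucket of its diagonal r+c, then renders the buckets
-- (objective: alternative).

-- cell fetch grid[r][c] (total; under Pre_ every access A/B performs is in range)
def pvCell (grid : List (List String)) (r c : Int) : List Char :=
  ((PySem.List.pyGet? ((PySem.List.pyGet? grid r).getD []) c).getD "").toList

-- ===== PORT A =====
-- generator get_diagonals(grid, k): rows in reversed(range(n)) with 0 <= k-i < m
def getDiagonals (grid : List (List String)) (k : Int) : List (Int × Int) :=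
  let m : Int := (grid.headD []).length
  ((PySem.List.pyRange 0 (grid.length : Int) 1).reverse).filterMap
    (fun i => if 0 ≤ k - i ∧ k - i < m then some (i, k - i) else none)

def format_45 (grid : List (List String)) : String :=
  let n : Int := (grid.length : Int)
  let m : Int := (grid.headD []).length
  let res1 := (PySem.List.pyRange 0 n 1).map (fun i =>
    List.replicate (n - i - 1).toNat ' ' ++
      PySem.Chars.join [' '] ((getDiagonals grid i).map (fun p => pvCell grid p.1 p.2)))
  let res2 := (PySem.List.pyRange 0 (m - 1) 1).map (fun i =>
    List.replicate (i + 1).toNat ' ' ++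
      PySem.Chars.join [' '] ((getDiagonals grid (n + i)).map (fun p => pvCell grid p.1 p.2)))
  String.ofList (PySem.Chars.join ['\n'] (res1 ++ res2))

-- ===== PORT B =====
-- inner loop of B: scatter row r's first m cells into the diagonal buckets r+c
def pvRowStep (grid : List (List String)) (m : Int)
    (bs : List (List (List Char))) (r : Int) : List (List (List Char)) :=
  (PySem.List.pyRange 0 m 1).foldl
    (fun bs c => bs.modify (r + c).toNat (fun d => d ++ [pvCell grid r c])) bs

def format_45_alt (grid : List (List String)) : String :=
  let n : Int := (grid.length : Int)
  let m : Int := (grid.headD []).length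
  let diags := ((PySem.List.pyRange 0 n 1).reverse).foldl (pvRowStep grid m)
      (List.replicate (n + m - 1).toNat ([] : List (List Char)))
  String.ofList (PySem.Chars.join ['\n']
    ((PySem.List.enumerate diags 0).map (fun kd =>
      List.replicate (n - 1 - kd.1).natAbs ' ' ++ PySem.Chars.join [' '] kd.2)))

-- ===== PRECONDITION & SPEC =====
-- Pre_ excludes empty grids and grids with a row shorter than the first row, on which A raises
-- IndexError, and zero-width grids (first row empty), an unspecified degenerate corner on which
-- A's one-blank-line-per-row output and B's n-1 blank diagonal lines are equally defensible.
def Pre_format_45 (grid : List (List String)) : Prop :=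
  grid ≠ [] ∧ 1 ≤ (grid.headD []).length ∧ ∀ row ∈ grid, (grid.headD []).length ≤ row.length
instance (grid : List (List String)) : Decidable (Pre_format_45 grid) := by
  unfold Pre_format_45; infer_instance
def pvWitness_format_45 : List (List String) := [["ab", "c"], ["d", "e"]]

def Spec_format_45 (grid : List (List String)) (out : String) : Prop := out = format_45_alt grid
instance (grid : List (List String)) (out : String) : Decidable (Spec_format_45 grid out) := by
  unfold Spec_format_45; infer_instance

-- ===== CLAIM (what is proved, stated in full; the proofs are below) =====
def Claim_equal_format_45 : Prop := ∀ (grid : List (List String)), Dom_format_45 grid → Pre_format_45 grid → Spec_format_45 grid (format_45 grid)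

-- ===== LEMMAS AND PROOFS =====

-- the common normal form: line k = indent ++ cells of diagonal k, rows descending
def pvGather (grid : List (List String)) (n m k : Int) : List (List Char) :=
  (PySem.List.pyRange (min k (n - 1)) (max 0 (k - m + 1) - 1) (-1)).map
    (fun r => pvCell grid r (k - r))

def pvLines (grid : List (List String)) (n m : Int) : List (List Char) :=
  (PySem.List.pyRange 0 (n + m - 1) 1).map (fun k =>
    List.replicate ((if k < n then n - 1 - k else k - n + 1)).toNat ' ' ++
      PySem.Chars.join [' '] (pvGather grid n m k))

-- A's reversed-row scan for diagonal k is exactly the descending row range of pvGather.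
theorem pv_diag_range (k m : Int) (n : Nat) :
    ((PySem.List.pyRange 0 (n : Int) 1).reverse).filterMap
      (fun i => if 0 ≤ k - i ∧ k - i < m then some (i, k - i) else none)
    = (PySem.List.pyRange (min k ((n : Int) - 1)) (max 0 (k - m + 1) - 1) (-1)).map
        (fun r => (r, k - r)) := by
  induction n with
  | zero =>
      rw [PySem.List.pyRange_one_eq_nil (by norm_num),
          PySem.List.pyRange_neg_one_eq_nil (by omega)]
      simp
  | succ n ih =>
      have h : ((n : Int) + 1) = ((n + 1 : Nat) : Int) := by push_cast; ring
      rw [← h, PySem.List.pyRange_one_succ_right (by positivity)]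
      by_cases hc : 0 ≤ k - (n : Int) ∧ k - (n : Int) < m
      · have h1 : min k ((n : Int) + 1 - 1) = (n : Int) := by omega
        have h2 : min k ((n : Int) - 1) = (n : Int) - 1 := by omega
        have h3 : max 0 (k - m + 1) - 1 < (n : Int) := by omega
        simp only [List.reverse_append, List.reverse_cons, List.reverse_nil, List.nil_append,
          List.cons_append, List.filterMap_cons, if_pos hc]
        rw [h1, PySem.List.pyRange_neg_one_cons h3, List.map_cons, ih, h2]
      · have h4 : min k ((n : Int) + 1 - 1) ≤ max 0 (k - m + 1) - 1 ∨
            min k ((n : Int) + 1 - 1) = min k ((n : Int) - 1) := by omega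
        simp only [List.reverse_append, List.reverse_cons, List.reverse_nil, List.nil_append,
          List.cons_append, List.filterMap_cons, if_neg hc]
        rcases h4 with h4 | h4
        · rw [PySem.List.pyRange_neg_one_eq_nil h4, ih,
              PySem.List.pyRange_neg_one_eq_nil (by omega)]
        · rw [h4, ih]

-- A's two staged loops produce exactly pvLines.
theorem pv_a_lines (grid : List (List String)) (h : Pre_format_45 grid) :
    ((PySem.List.pyRange 0 ((grid.length : Int)) 1).map (fun i =>
        List.replicate ((grid.length : Int) - i - 1).toNat ' ' ++
          PySem.Chars.join [' '] ((getDiagonals grid i).map (fun p => pvCell grid p.1 p.2)))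
      ++ (PySem.List.pyRange 0 (((grid.headD []).length : Int) - 1) 1).map (fun i =>
        List.replicate (i + 1).toNat ' ' ++
          PySem.Chars.join [' ']
            ((getDiagonals grid ((grid.length : Int) + i)).map (fun p => pvCell grid p.1 p.2))))
    = pvLines grid (grid.length : Int) ((grid.headD []).length : Int) := by
  obtain ⟨hne, hm, -⟩ := h
  set n : Int := (grid.length : Int) with hn_def
  set m : Int := ((grid.headD []).length : Int) with hm_def
  have hn1 : (1 : Int) ≤ n := by
    rw [hn_def]
    exact_mod_cast Nat.one_le_iff_ne_zero.mpr (by simpa [List.length_eq_zero_iff] using hne)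
  have hm1 : (1 : Int) ≤ m := by rw [hm_def]; exact_mod_cast hm
  have key : ∀ k : Int, (getDiagonals grid k).map (fun p => pvCell grid p.1 p.2)
      = pvGather grid n m k := by
    intro k
    simp only [getDiagonals, pvGather, ← hn_def, ← hm_def]
    rw [hn_def, pv_diag_range k m grid.length, ← hn_def, List.map_map]
    rfl
  unfold pvLines
  rw [PySem.List.pyRange_one_append 0 n (n + m - 1) (by omega) (by omega), List.map_append]
  congr 1
  · apply List.map_congr_left
    intro i hi
    rw [PySem.List.mem_pyRange_one] at hi
    rw [key i, if_pos hi.2, show n - i - 1 = n - 1 - i from by ring]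
  · rw [PySem.List.pyRange_one n (n + m - 1), PySem.List.pyRange_one 0 (m - 1),
        show n + m - 1 - n = m - 1 from by ring, show m - 1 - 0 = m - 1 from by ring,
        List.map_map, List.map_map]
    apply List.map_congr_left
    intro j _
    simp only [Function.comp_apply, zero_add]
    rw [key (n + (j : Int)), if_neg (by omega : ¬ n + (j : Int) < n),
        show n + (j : Int) - n + 1 = (j : Int) + 1 from by ring]

-- one row of B's scatter, read back at bucket k
theorem pv_rowStep_getElem? (grid : List (List String)) (mN : Nat) (r : Int) (hr : 0 ≤ r)
    (bs : List (List (List Char))) (k : Nat) :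
    (pvRowStep grid (mN : Int) bs r)[k]? =
      bs[k]?.map (fun d =>
        if r ≤ (k : Int) ∧ (k : Int) < r + (mN : Int) then d ++ [pvCell grid r ((k : Int) - r)]
        else d) := by
  induction mN with
  | zero =>
      unfold pvRowStep
      rw [PySem.List.pyRange_one_eq_nil (by norm_num)]
      simp only [List.foldl_nil]
      cases bs[k]? with
      | none => simp
      | some d => simp
  | succ mN ih =>
      unfold pvRowStep
      have hcast : ((mN + 1 : Nat) : Int) = (mN : Int) + 1 := by push_cast; ring
      rw [hcast, PySem.List.pyRange_one_succ_right (by positivity), List.foldl_append]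
      simp only [List.foldl_cons, List.foldl_nil]
      rw [List.getElem?_modify]
      unfold pvRowStep at ih
      rw [ih]
      cases bs[k]? with
      | none => simp
      | some d =>
          simp only [Option.map_some, Option.map_eq_map]
          by_cases hk : (k : Int) = r + (mN : Int)
          · have h5 : (k : Int) - r = (mN : Int) := by omega
            rw [h5]
            split_ifs <;> first | rfl | omega
          · split_ifs <;> first | rfl | omega

-- B's whole scatter pass, read back at bucket k
theorem pv_scatter_getElem? (grid : List (List String)) (mN : Nat)
    (rs : List Int) (hrs : ∀ r ∈ rs, 0 ≤ r) (bs : List (List (List Char))) (k : Nat) :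
    (rs.foldl (pvRowStep grid (mN : Int)) bs)[k]? =
      bs[k]?.map (fun d => d ++ rs.filterMap (fun r =>
        if r ≤ (k : Int) ∧ (k : Int) < r + (mN : Int) then some (pvCell grid r ((k : Int) - r))
        else none)) := by
  induction rs generalizing bs with
  | nil =>
      simp only [List.foldl_nil, List.filterMap_nil]
      cases bs[k]? <;> simp
  | cons r rs ih =>
      simp only [List.foldl_cons, List.filterMap_cons]
      rw [ih (fun x hx => hrs x (List.mem_cons_of_mem _ hx)),
          pv_rowStep_getElem? grid mN r (hrs r List.mem_cons_self) bs k]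
      cases bs[k]? with
      | none => simp
      | some d =>
          simp only [Option.map_some]
          by_cases hin : r ≤ (k : Int) ∧ (k : Int) < r + (mN : Int)
          · rw [if_pos hin, if_pos hin]; simp
          · rw [if_neg hin, if_neg hin]

-- enumerate of a mapped list
theorem pv_enumerate_map {α β : Type} (xs : List α) (f : α → β) (s : Int) :
    PySem.List.enumerate (xs.map f) s =
      (PySem.List.enumerate xs s).map (fun p => (p.1, f p.2)) := by
  induction xs generalizing s with
  | nil => simp [PySem.List.enumerate_nil]
  | cons x xs ih => simp [PySem.List.enumerate_cons, ih]

-- enumerate of pyRange 0 N 1 pairs each index with itself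
theorem pv_enumerate_pyRange (N : Nat) :
    PySem.List.enumerate (PySem.List.pyRange 0 (N : Int) 1) 0 =
      (PySem.List.pyRange 0 (N : Int) 1).map (fun k => (k, k)) := by
  suffices h : ∀ (N : Nat) (s : Int),
      PySem.List.enumerate (PySem.List.pyRange s (s + (N : Int)) 1) s =
        (PySem.List.pyRange s (s + (N : Int)) 1).map (fun k => (k, k)) by
    have := h N 0; simpa using this
  intro N
  induction N with
  | zero => intro s; rw [PySem.List.pyRange_one_eq_nil (by omega)]; simp
  | succ N ih =>
      intro s
      have hcast : s + ((N + 1 : Nat) : Int) = (s + (N : Int)) + 1 := by push_cast; ring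
      rw [hcast, PySem.List.pyRange_one_succ_right (by omega), List.map_append,
          PySem.List.enumerate_append, ih s]
      congr 1
      simp [PySem.List.enumerate_cons, PySem.List.length_pyRange_one, PySem.List.enumerate_nil]

-- B's bucket list is the gather list
theorem pv_diags_eq (grid : List (List String)) (h : Pre_format_45 grid) :
    ((PySem.List.pyRange 0 ((grid.length : Int)) 1).reverse).foldl
        (pvRowStep grid ((grid.headD []).length : Int))
        (List.replicate (((grid.length : Int) + ((grid.headD []).length : Int) - 1)).toNat
          ([] : List (List Char)))
    = (PySem.List.pyRange 0 ((grid.length : Int) + ((grid.headD []).length : Int) - 1) 1).map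
        (pvGather grid (grid.length : Int) ((grid.headD []).length : Int)) := by
  obtain ⟨hne, hm, -⟩ := h
  set n : Int := (grid.length : Int) with hn_def
  set m : Int := ((grid.headD []).length : Int) with hm_def
  have hn1 : (1 : Int) ≤ n := by
    rw [hn_def]
    exact_mod_cast Nat.one_le_iff_ne_zero.mpr (by simpa [List.length_eq_zero_iff] using hne)
  have hm1 : (1 : Int) ≤ m := by rw [hm_def]; exact_mod_cast hm
  have hrs : ∀ r ∈ (PySem.List.pyRange 0 n 1).reverse, 0 ≤ r := by
    intro r hr
    rw [List.mem_reverse, PySem.List.mem_pyRange_one] at hr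
    exact hr.1
  apply List.ext_getElem?
  intro k
  rw [show m = (((grid.headD []).length : Nat) : Int) from hm_def] at *
  rw [pv_scatter_getElem? grid (grid.headD []).length _ hrs _ k]
  by_cases hk : (k : Int) < n + m - 1
  · have hk' : k < (n + m - 1).toNat := by omega
    have hlen : (List.replicate (n + m - 1).toNat ([] : List (List Char))).length
        = (n + m - 1).toNat := List.length_replicate
    rw [List.getElem?_eq_getElem (by rw [hlen]; exact hk'), List.getElem_replicate,
        List.getElem?_eq_getElem (by rw [List.length_map, PySem.List.length_pyRange_one]; omega),
        List.getElem_map]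
    simp only [Option.map_some, List.nil_append]
    congr 1
    · simp only [PySem.List.getElem_pyRange_one, zero_add]
      have hfil : ((PySem.List.pyRange 0 n 1).reverse).filterMap (fun r =>
          if r ≤ (k : Int) ∧ (k : Int) < r + m then some (pvCell grid r ((k : Int) - r))
          else none)
        = (((PySem.List.pyRange 0 n 1).reverse).filterMap (fun i =>
            if 0 ≤ (k : Int) - i ∧ (k : Int) - i < m then some (i, (k : Int) - i)
            else none)).map (fun p => pvCell grid p.1 p.2) := by
        rw [List.map_filterMap]
        apply List.filterMap_congr
        intro r _
        by_cases hc : 0 ≤ (k : Int) - r ∧ (k : Int) - r < m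
        · rw [if_pos hc, if_pos (by omega)]; rfl
        · rw [if_neg hc, if_neg (by omega)]; rfl
      rw [hfil, hn_def, pv_diag_range ((k : Int)) m grid.length, ← hn_def, List.map_map]
      simp only [pvGather]
      rfl
  · rw [List.getElem?_eq_none, List.getElem?_eq_none]
    · simp
    · rw [List.length_map, PySem.List.length_pyRange_one]; omega
    · rw [List.length_replicate]; omega

-- B's render of the buckets is pvLines
theorem pv_b_lines (grid : List (List String)) (h : Pre_format_45 grid) :
    (PySem.List.enumerate
        (((PySem.List.pyRange 0 ((grid.length : Int)) 1).reverse).foldl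
          (pvRowStep grid ((grid.headD []).length : Int))
          (List.replicate (((grid.length : Int) + ((grid.headD []).length : Int) - 1)).toNat
            ([] : List (List Char)))) 0).map (fun kd =>
      List.replicate ((grid.length : Int) - 1 - kd.1).natAbs ' ' ++
        PySem.Chars.join [' '] kd.2)
    = pvLines grid (grid.length : Int) ((grid.headD []).length : Int) := by
  set n : Int := (grid.length : Int) with hn_def
  set m : Int := ((grid.headD []).length : Int) with hm_def
  have hn0 : (0 : Int) ≤ n := by rw [hn_def]; positivity
  have hm0 : (0 : Int) ≤ m := by rw [hm_def]; positivity
  rw [pv_diags_eq grid h, ← hn_def, ← hm_def, pv_enumerate_map]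
  have hN : n + m - 1 = (((n + m - 1).toNat : Nat) : Int) ∨ n + m - 1 ≤ 0 := by omega
  rcases hN with hN | hN
  · rw [hN, pv_enumerate_pyRange, ← hN, List.map_map, List.map_map]
    unfold pvLines
    apply List.map_congr_left
    intro k hk
    rw [PySem.List.mem_pyRange_one] at hk
    simp only [Function.comp_apply]
    congr 1
    congr 1
    omega
  · rw [PySem.List.pyRange_one_eq_nil hN]
    unfold pvLines
    rw [PySem.List.pyRange_one_eq_nil hN]
    simp [PySem.List.enumerate_nil]

-- ===== VERDICT (by name: the statement is the Claim_ definition above) =====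
theorem format_45_spec : Claim_equal_format_45 := by
  intro grid _ hpre
  unfold Spec_format_45 format_45 format_45_alt
  simp only []
  rw [pv_a_lines grid hpre, ← pv_b_lines grid hpre]
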